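-- pv_equiv track=rewrite | github.com/AIRI-Institute/CSSlib | src/csslib/tools/calculations/scheduler.py | __uniform_reduce
-- ===== SOURCE A (Python) =====
-- def __uniform_reduce(workers: dict, remain_workers_to_remove: int) -> tuple[int, dict]:
--     """
--         Performs uniform reduction of the workers dictionaries with equal number of cores.
--     """
--     workers_number = sum(workers.values())
--     if remain_workers_to_remove >= workers_number:
--         for server in workers:
--             workers[server] = 0
--         remain_workers_to_remove -= workers_number
--     else:
--         while remain_workers_to_remove:
--             max_workers = max(workers.values())
--             for server in workers:
--                 if workers[server] == max_workers and workers[server] > 0: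
--                     workers[server] -= 1
--                     remain_workers_to_remove -= 1
--                     break
--     return remain_workers_to_remove, workers
-- ===== SOURCE B (Python) =====
-- def __uniform_reduce(workers: dict, remain_workers_to_remove: int) -> tuple[int, dict]:
--     """
--         Uniform reduction by water-filling: find the final level arithmetically
--         (binary search on the monotone 'amount removed when clipping to level L')
--         instead of decrementing the max one unit at a time.
--         Mutates `workers` in place, like the original.
--     """
--     total = sum(workers.values())
--     if remain_workers_to_remove >= total:
--         for server in workers:
--             workers[server] = 0
--         return remain_workers_to_remove - total, workers
--     k = remain_workers_to_remove
--
--     def removed_above(level):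
--         return sum(v - level for v in workers.values() if v > level)
--
--     lo, hi = 0, max(workers.values())
--     # invariant (for 0 <= k < total): removed_above(lo) > k >= removed_above(hi)
--     while hi - lo > 1:
--         mid = (lo + hi) // 2
--         if removed_above(mid) <= k:
--             hi = mid
--         else:
--             lo = mid
--     level = hi  # smallest level with removed_above(level) <= k
--     extra = k - removed_above(level)
--     for server, v in workers.items():
--         if v >= level and extra > 0:
--             workers[server] = level - 1
--             extra -= 1
--         elif v > level:
--             workers[server] = level
--     return 0, workers
-- ===== Notes on version B (the rewrite author's own statement) =====
-- stated objective: faster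
-- what changed: Replaces the unit-decrement loop (recompute max, decrement first max, repeat remain times) by water-filling: binary-search the final clip level on the monotone removed-mass function, then write the final values in one ordered pass (first 'extra' servers at or above the level get level-1).
import Mathlib
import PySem

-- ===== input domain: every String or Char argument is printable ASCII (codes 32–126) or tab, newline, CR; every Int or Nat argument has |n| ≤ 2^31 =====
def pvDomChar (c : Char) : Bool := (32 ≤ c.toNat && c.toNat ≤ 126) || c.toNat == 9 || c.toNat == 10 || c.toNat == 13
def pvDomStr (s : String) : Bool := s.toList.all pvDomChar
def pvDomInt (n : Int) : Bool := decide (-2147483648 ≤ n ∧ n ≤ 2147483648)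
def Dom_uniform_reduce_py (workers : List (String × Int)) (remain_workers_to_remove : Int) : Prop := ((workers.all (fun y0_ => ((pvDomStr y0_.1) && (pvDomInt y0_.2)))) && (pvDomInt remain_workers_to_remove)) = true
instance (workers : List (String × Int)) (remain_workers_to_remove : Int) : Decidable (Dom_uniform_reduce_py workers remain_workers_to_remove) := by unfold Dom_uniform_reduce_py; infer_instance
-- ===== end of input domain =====

-- B replaces A's one-unit-at-a-time decrement loop by water-filling (binary search for the
-- final clip level, then one ordered output pass); objective: faster. Both Pythons mutate
-- `workers` in place and return it; the final dict contents equal the returned ones in both,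
-- so the return-value equivalence proved here covers the side effect as well.

-- ===== PORT A =====
-- `workers[server] -= 1` on the first server (in order) whose value equals the max and is > 0;
-- returns the list unchanged when the inner for-loop finds no such server.
def pvDec : List (String × Int) → Int → List (String × Int)
  | [], _ => []
  | (s, v) :: rest, m => if v = m ∧ 0 < v then (s, v - 1) :: rest else (s, v) :: pvDec rest m

-- A's `while remain_workers_to_remove:` loop; fuel = initial remain.toNat suffices on every
-- input where the Python loop terminates (there it decrements remain by exactly 1 per iteration).
-- `max(workers.values())` raises on an empty dict: Pre_ excludes reaching that state (getD 0 unreached).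
def urLoop : List (String × Int) → Int → Nat → Int × List (String × Int)
  | ws, rem, 0 => (rem, ws)
  | ws, rem, Nat.succ fuel =>
    if rem = 0 then (rem, ws)
    else
      let m := (PySem.List.max? (ws.map Prod.snd) (fun v => v)).getD 0
      if ws.any (fun p => decide (p.2 = m ∧ 0 < p.2)) then urLoop (pvDec ws m) (rem - 1) fuel
      else urLoop ws rem fuel

def uniform_reduce_py (workers : List (String × Int)) (remain_workers_to_remove : Int) : Int × (List (String × Int)) :=
  let workers_number := (workers.map Prod.snd).sum
  if remain_workers_to_remove ≥ workers_number then
    (remain_workers_to_remove - workers_number, workers.map (fun p => (p.1, 0)))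
  else
    urLoop workers remain_workers_to_remove remain_workers_to_remove.toNat

-- ===== PORT B =====
-- Source B's removed_above(level): total mass removed when clipping every value down to `level`.
def pvFAbove (ws : List (String × Int)) (L : Int) : Int :=
  (ws.map (fun p => if L < p.2 then p.2 - L else 0)).sum

-- Source B's binary-search while-loop (state lo, hi; returns the final hi = level).
def pvBS (ws : List (String × Int)) (k lo hi : Int) : Int :=
  if _h : 1 < hi - lo then
    let mid := PySem.Int.floordiv (lo + hi) 2
    if pvFAbove ws mid ≤ k then pvBS ws k lo mid else pvBS ws k mid hi
  else hi
termination_by (hi - lo).toNat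
decreasing_by
  all_goals
    simp only [PySem.Int.floordiv_eq_ediv_of_pos (by norm_num : (0:Int) < 2)]
    omega

-- Source B's final for-loop: first `extra` servers with v ≥ level get level-1, others clip to level.
def pvBuild : List (String × Int) → Int → Int → List (String × Int)
  | [], _, _ => []
  | (s, v) :: rest, L, extra =>
    if L ≤ v ∧ 0 < extra then (s, L - 1) :: pvBuild rest L (extra - 1)
    else if L < v then (s, L) :: pvBuild rest L extra
    else (s, v) :: pvBuild rest L extra

def uniform_reduce_py_alt (workers : List (String × Int)) (remain_workers_to_remove : Int) : Int × (List (String × Int)) :=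
  let total := (workers.map Prod.snd).sum
  if remain_workers_to_remove ≥ total then
    (remain_workers_to_remove - total, workers.map (fun p => (p.1, 0)))
  else
    let maxv := (PySem.List.max? (workers.map Prod.snd) (fun v => v)).getD 0
    let level := pvBS workers remain_workers_to_remove 0 maxv
    (0, pvBuild workers level (remain_workers_to_remove - pvFAbove workers level))

-- ===== PRECONDITION & SPEC =====
-- Pre_ excludes exactly the inputs on which the Python A does not return: with
-- remain_workers_to_remove < 0 and < sum(values), A's while-loop never reaches 0
-- (it diverges; on the empty dict it raises ValueError in max()).
def Pre_uniform_reduce_py (workers : List (String × Int)) (remain_workers_to_remove : Int) : Prop :=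
  0 ≤ remain_workers_to_remove ∨ (workers.map Prod.snd).sum ≤ remain_workers_to_remove

instance (workers : List (String × Int)) (remain_workers_to_remove : Int) : Decidable (Pre_uniform_reduce_py workers remain_workers_to_remove) := by unfold Pre_uniform_reduce_py; infer_instance

def pvWitness_uniform_reduce_py : (List (String × Int)) × Int := ([("a", 3), ("b", 1)], 2)

def Spec_uniform_reduce_py (workers : List (String × Int)) (remain_workers_to_remove : Int) (out : Int × (List (String × Int))) : Prop := out = uniform_reduce_py_alt workers remain_workers_to_remove
instance (workers : List (String × Int)) (remain_workers_to_remove : Int) (out : Int × (List (String × Int))) : Decidable (Spec_uniform_reduce_py workers remain_workers_to_remove out) := by unfold Spec_uniform_reduce_py; infer_instance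

-- ===== CLAIM (what is proved, stated in full; the proofs are below) =====
def Claim_equal_uniform_reduce_py : Prop := ∀ (workers : List (String × Int)) (remain_workers_to_remove : Int), Dom_uniform_reduce_py workers remain_workers_to_remove → Pre_uniform_reduce_py workers remain_workers_to_remove → Spec_uniform_reduce_py workers remain_workers_to_remove (uniform_reduce_py workers remain_workers_to_remove)

-- ===== LEMMAS AND PROOFS =====

lemma pvFAbove_nonneg (ws : List (String × Int)) (L : Int) : 0 ≤ pvFAbove ws L := by
  induction ws with
  | nil => simp [pvFAbove]
  | cons p rest ih =>
    simp only [pvFAbove, List.map_cons, List.sum_cons] at *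
    split_ifs <;> omega

lemma pvFAbove_eq_zero (ws : List (String × Int)) (m L : Int)
    (hle : ∀ p ∈ ws, p.2 ≤ m) (h : m ≤ L) : pvFAbove ws L = 0 := by
  induction ws with
  | nil => simp [pvFAbove]
  | cons p rest ih =>
    have hp := hle p (by simp)
    have hrest : ∀ q ∈ rest, q.2 ≤ m := fun q hq => hle q (by simp [hq])
    simp only [pvFAbove, List.map_cons, List.sum_cons] at *
    rw [ih hrest]
    split_ifs <;> omega

lemma sum_le_pvFAbove_zero (ws : List (String × Int)) :
    (ws.map Prod.snd).sum ≤ pvFAbove ws 0 := by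
  induction ws with
  | nil => simp [pvFAbove]
  | cons p rest ih =>
    simp only [pvFAbove, List.map_cons, List.sum_cons] at *
    split_ifs <;> omega

lemma any_rest {p : String × Int} {rest : List (String × Int)} {m : Int}
    (h : (p :: rest).any (fun q => decide (q.2 = m ∧ 0 < q.2)) = true)
    (hc : ¬ (p.2 = m ∧ 0 < p.2)) :
    rest.any (fun q => decide (q.2 = m ∧ 0 < q.2)) = true := by
  simp only [List.any_cons, Bool.or_eq_true, decide_eq_true_eq] at h
  rcases h with h | h
  · exact absurd h hc
  · exact h

lemma pvDec_sum (ws : List (String × Int)) (m : Int)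
    (h : ws.any (fun p => decide (p.2 = m ∧ 0 < p.2)) = true) :
    ((pvDec ws m).map Prod.snd).sum = (ws.map Prod.snd).sum - 1 := by
  induction ws with
  | nil => simp at h
  | cons p rest ih =>
    obtain ⟨s, v⟩ := p
    by_cases hc : v = m ∧ 0 < v
    · simp only [pvDec, if_pos hc, List.map_cons, List.sum_cons]
      omega
    · simp only [pvDec, if_neg hc, List.map_cons, List.sum_cons, ih (any_rest h hc)]
      omega

lemma pvDec_fAbove (ws : List (String × Int)) (m L : Int)
    (h : ws.any (fun p => decide (p.2 = m ∧ 0 < p.2)) = true) :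
    pvFAbove (pvDec ws m) L = pvFAbove ws L - (if L < m then 1 else 0) := by
  induction ws with
  | nil => simp at h
  | cons p rest ih =>
    obtain ⟨s, v⟩ := p
    by_cases hc : v = m ∧ 0 < v
    · obtain ⟨hvm, hv⟩ := hc
      simp only [pvDec]
      rw [if_pos (⟨hvm, hv⟩ : v = m ∧ 0 < v)]
      simp only [pvFAbove, List.map_cons, List.sum_cons]
      split_ifs <;> omega
    · simp only [pvDec, if_neg hc, pvFAbove, List.map_cons, List.sum_cons]
      have := ih (any_rest h hc)
      simp only [pvFAbove] at this
      rw [this]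
      split_ifs <;> omega

lemma pvBuild_zero (ws : List (String × Int)) (L : Int)
    (h : pvFAbove ws L = 0) : pvBuild ws L 0 = ws := by
  induction ws with
  | nil => simp [pvBuild]
  | cons p rest ih =>
    obtain ⟨s, v⟩ := p
    have hrest0 : 0 ≤ pvFAbove rest L := pvFAbove_nonneg rest L
    simp only [pvFAbove, List.map_cons, List.sum_cons] at h
    change (if L < v then v - L else 0) + pvFAbove rest L = 0 at h
    have hterm : ¬ (L < v) := by
      intro hlt
      rw [if_pos hlt] at h
      omega
    rw [if_neg hterm] at h
    simp only [pvBuild]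
    rw [if_neg (by omega : ¬ (L ≤ v ∧ (0:Int) < 0)), if_neg hterm, ih (by omega)]

-- key commutation: decrementing the first maximal server shifts the water-filling output
-- by one unit of `extra` exactly when the level equals the max, and not at all otherwise.
lemma pvBuild_dec (ws : List (String × Int)) (m L : Int) :
    ∀ extra : Int,
    ws.any (fun p => decide (p.2 = m ∧ 0 < p.2)) = true →
    (∀ p ∈ ws, p.2 ≤ m) →
    1 ≤ L → L ≤ m → 0 ≤ extra → (L = m → 1 ≤ extra) →
    pvBuild ws L extra = pvBuild (pvDec ws m) L (extra - (if L = m then 1 else 0)) := by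
  induction ws with
  | nil => intro extra h; simp at h
  | cons p rest ih =>
    intro extra hany hle hL1 hLm hex hexm
    obtain ⟨s, v⟩ := p
    have hrestle : ∀ q ∈ rest, q.2 ≤ m := fun q hq => hle q (by simp [hq])
    by_cases hc : v = m ∧ 0 < v
    · obtain ⟨hvm, hv⟩ := hc
      simp only [pvDec]
      rw [if_pos (⟨hvm, hv⟩ : v = m ∧ 0 < v)]
      by_cases hLeq : L = m
      · -- level equals the max: the head absorbs the one removed unit
        have h1 : 1 ≤ extra := hexm hLeq
        rw [if_pos hLeq]
        simp only [pvBuild]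
        rw [if_pos (⟨by omega, by omega⟩ : L ≤ v ∧ 0 < extra),
            if_neg (by omega : ¬ (L ≤ v - 1 ∧ 0 < extra - 1)),
            if_neg (by omega : ¬ (L < v - 1))]
        rw [show L - 1 = v - 1 by omega]
      · -- level strictly below the max
        have hLlt : L < v := by omega
        rw [if_neg hLeq]
        by_cases hpos : 0 < extra
        · simp only [pvBuild]
          rw [if_pos (⟨by omega, hpos⟩ : L ≤ v ∧ 0 < extra),
              if_pos (⟨by omega, by omega⟩ : L ≤ v - 1 ∧ 0 < extra - 0)]
          rw [show extra - 0 - 1 = extra - 1 by omega]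
        · have hzero : extra = 0 := by omega
          subst hzero
          simp only [pvBuild]
          rw [if_neg (by omega : ¬ (L ≤ v ∧ (0:Int) < 0)), if_pos hLlt,
              if_neg (by omega : ¬ (L ≤ v - 1 ∧ (0:Int) < 0 - 0))]
          rw [show (0:Int) - 0 = 0 by norm_num]
          by_cases hedge : L < v - 1
          · rw [if_pos hedge]
          · rw [if_neg hedge]
            rw [show L = v - 1 by omega]
    · -- head untouched: both sides treat it identically, recurse
      have hrest := any_rest hany hc
      have hvne : v < m ∨ v ≤ 0 := by
        by_cases h1 : v = m
        · right; have := fun h2 => hc ⟨h1, h2⟩; omega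
        · left; exact lt_of_le_of_ne (hle (s, v) (by simp)) h1
      simp only [pvDec, if_neg hc]
      by_cases hLeq : L = m
      · -- head is strictly below the level, consumes nothing
        have hvL : v < L := by omega
        simp only [pvBuild]
        rw [if_neg (by omega : ¬ (L ≤ v ∧ 0 < extra)), if_neg (by omega : ¬ (L < v)),
            if_neg (by omega : ¬ (L ≤ v ∧ 0 < extra - if L = m then 1 else 0)),
            if_neg (by omega : ¬ (L < v)),
            ih extra hrest hrestle hL1 hLm hex hexm]
      · rw [if_neg hLeq]
        simp only [pvBuild]
        by_cases hc1 : L ≤ v ∧ 0 < extra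
        · rw [if_pos hc1, if_pos (by omega : L ≤ v ∧ 0 < extra - 0)]
          have := ih (extra - 1) hrest hrestle hL1 hLm (by omega) (by omega)
          rw [if_neg hLeq] at this
          rw [this]
          congr 2
          omega
        · rw [if_neg hc1, if_neg (by omega : ¬ (L ≤ v ∧ 0 < extra - 0))]
          have := ih extra hrest hrestle hL1 hLm hex (by omega)
          rw [if_neg hLeq] at this
          by_cases hc2 : L < v
          · rw [if_pos hc2, if_pos hc2, this]
          · rw [if_neg hc2, if_neg hc2, this]

lemma pvBS_spec (ws : List (String × Int)) (k : Int) :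
    ∀ (N : Nat) (lo hi : Int), (hi - lo).toNat ≤ N → lo < hi →
    k < pvFAbove ws lo → pvFAbove ws hi ≤ k →
    lo < pvBS ws k lo hi ∧ pvBS ws k lo hi ≤ hi ∧
      pvFAbove ws (pvBS ws k lo hi) ≤ k ∧ k < pvFAbove ws (pvBS ws k lo hi - 1) := by
  intro N
  induction N with
  | zero => intro lo hi hN hlt _ _; omega
  | succ N ih =>
    intro lo hi hN hlt hflo hfhi
    have h2 : PySem.Int.floordiv (lo + hi) 2 = (lo + hi) / 2 :=
      PySem.Int.floordiv_eq_ediv_of_pos (by norm_num : (0:Int) < 2)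
    by_cases hgap : 1 < hi - lo
    · rw [pvBS, dif_pos hgap]
      by_cases hmid : pvFAbove ws (PySem.Int.floordiv (lo + hi) 2) ≤ k
      · simp only [if_pos hmid]
        have := ih lo (PySem.Int.floordiv (lo + hi) 2) (by omega) (by omega) hflo hmid
        omega
      · simp only [if_neg hmid]
        have := ih (PySem.Int.floordiv (lo + hi) 2) hi (by omega) (by omega) (by omega) hfhi
        omega
    · rw [pvBS, dif_neg hgap]
      have hlo : hi - 1 = lo := by omega
      rw [hlo]
      omega

lemma sum_nonpos_of_le_zero (xs : List Int) (h : ∀ x ∈ xs, x ≤ 0) : xs.sum ≤ 0 := by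
  induction xs with
  | nil => simp
  | cons x rest ih =>
    have := h x (by simp)
    have := ih (fun y hy => h y (by simp [hy]))
    simp only [List.sum_cons]
    omega

-- main invariant: A's loop, run for exactly k steps, produces B's water-filling output,
-- as long as L is characterised by  pvFAbove ws L ≤ k < pvFAbove ws (L-1).
lemma urLoop_eq (L : Int) : ∀ (n : Nat) (ws : List (String × Int)),
    (n : Int) < (ws.map Prod.snd).sum → 1 ≤ L →
    pvFAbove ws L ≤ (n : Int) → (n : Int) < pvFAbove ws (L - 1) →
    urLoop ws (n : Int) n = (0, pvBuild ws L ((n : Int) - pvFAbove ws L)) := by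
  intro n
  induction n with
  | zero =>
    intro ws _ _ hf _
    have h0 : pvFAbove ws L = 0 := le_antisymm (by exact_mod_cast hf) (pvFAbove_nonneg ws L)
    simp only [Nat.cast_zero, urLoop, h0, sub_zero]
    rw [pvBuild_zero ws L h0]
  | succ n ih =>
    intro ws hsum hL1 hfL hfL1
    have hk1 : (1 : Int) ≤ (n + 1 : Nat) := by push_cast; omega
    -- the max element of the nonempty value list
    have hne : ws ≠ [] := by
      intro h; subst h; simp at hsum; omega
    obtain ⟨m, hm⟩ : ∃ m, PySem.List.max? (ws.map Prod.snd) (fun v => v) = some m := by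
      cases h : PySem.List.max? (ws.map Prod.snd) (fun v => v) with
      | none =>
        rw [PySem.List.max?_eq_none_iff] at h
        exact absurd (List.map_eq_nil_iff.mp h) hne
      | some m => exact ⟨m, rfl⟩
    have hmmem : m ∈ ws.map Prod.snd := PySem.List.max?_mem hm
    have hmax : ∀ v ∈ ws.map Prod.snd, v ≤ m := fun v hv => PySem.List.max?_isMax hm v hv
    have hmle : ∀ p ∈ ws, p.2 ≤ m := by
      intro p hp
      exact hmax p.2 (List.mem_map.mpr ⟨p, hp, rfl⟩)
    have hmpos : 0 < m := by
      by_contra h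
      have : (ws.map Prod.snd).sum ≤ 0 :=
        sum_nonpos_of_le_zero _ (fun x hx => le_trans (hmax x hx) (by omega))
      omega
    have hany : ws.any (fun p => decide (p.2 = m ∧ 0 < p.2)) = true := by
      obtain ⟨p, hp, hpv⟩ := List.mem_map.mp hmmem
      exact List.any_eq_true.mpr ⟨p, hp, by simp [hpv, hmpos]⟩
    have hLm : L ≤ m := by
      by_contra h
      have : pvFAbove ws (L - 1) = 0 := pvFAbove_eq_zero ws m (L - 1) hmle (by omega)
      omega
    -- unfold one iteration of A's loop
    have hstep : urLoop ws ((n + 1 : Nat) : Int) (n + 1)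
        = urLoop (pvDec ws m) (((n + 1 : Nat) : Int) - 1) n := by
      show (if ((n + 1 : Nat) : Int) = 0 then _ else _) = _
      rw [if_neg (by omega : ¬ ((n + 1 : Nat) : Int) = 0)]
      simp only [hm, Option.getD_some, hany, if_pos]
    have hcast : ((n + 1 : Nat) : Int) - 1 = (n : Int) := by push_cast; omega
    rw [hstep, hcast]
    have hdec := pvDec_fAbove ws m
    have hsum' : (n : Int) < ((pvDec ws m).map Prod.snd).sum := by
      rw [pvDec_sum ws m hany]; push_cast at hsum ⊢; omega
    have hfL' : pvFAbove (pvDec ws m) L ≤ (n : Int) := by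
      rw [hdec L hany]
      by_cases hLeq : L = m
      · have h0 : pvFAbove ws L = 0 := pvFAbove_eq_zero ws m L hmle (by omega)
        rw [h0, if_neg (by omega : ¬ L < m)]
        push_cast at hfL1 ⊢; omega
      · rw [if_pos (by omega : L < m)]
        push_cast at hfL ⊢; omega
    have hfL1' : (n : Int) < pvFAbove (pvDec ws m) (L - 1) := by
      rw [hdec (L - 1) hany, if_pos (by omega : L - 1 < m)]
      push_cast at hfL1 ⊢; omega
    rw [ih (pvDec ws m) hsum' hL1 hfL' hfL1']
    -- now relate the two water-filling outputs via the commutation lemma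
    have hb := pvBuild_dec ws m L ((((n : Nat) + 1 : Nat) : Int) - pvFAbove ws L) hany hmle hL1 hLm
      (by push_cast at hfL ⊢; omega)
      (by
        intro hLeq
        have h0 : pvFAbove ws L = 0 := pvFAbove_eq_zero ws m L hmle (by omega)
        rw [h0]; push_cast; omega)
    rw [hb]
    have hext : (n : Int) - pvFAbove (pvDec ws m) L
        = ((((n : Nat) + 1 : Nat) : Int) - pvFAbove ws L) - (if L = m then 1 else 0) := by
      rw [hdec L hany]
      by_cases hLeq : L = m
      · have h0 : pvFAbove ws L = 0 := pvFAbove_eq_zero ws m L hmle (by omega)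
        rw [if_pos hLeq, if_neg (by omega : ¬ L < m), h0]
        push_cast; omega
      · rw [if_neg hLeq, if_pos (by omega : L < m)]
        push_cast; omega
    rw [hext]

-- ===== VERDICT (by name: the statement is the Claim_ definition above) =====
theorem uniform_reduce_py_spec : Claim_equal_uniform_reduce_py := by
  intro ws k _ hPre
  unfold Spec_uniform_reduce_py uniform_reduce_py uniform_reduce_py_alt
  by_cases hge : k ≥ (ws.map Prod.snd).sum
  · simp only [if_pos hge]
  · simp only [if_neg hge]
    have hk0 : 0 ≤ k := by
      rcases hPre with h | h
      · exact h
      · omega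
    have hksum : k < (ws.map Prod.snd).sum := by omega
    have hne : ws ≠ [] := by
      intro h; subst h; simp at hksum; omega
    obtain ⟨m, hm⟩ : ∃ m, PySem.List.max? (ws.map Prod.snd) (fun v => v) = some m := by
      cases h : PySem.List.max? (ws.map Prod.snd) (fun v => v) with
      | none =>
        rw [PySem.List.max?_eq_none_iff] at h
        exact absurd (List.map_eq_nil_iff.mp h) hne
      | some m => exact ⟨m, rfl⟩
    have hmax : ∀ v ∈ ws.map Prod.snd, v ≤ m := fun v hv => PySem.List.max?_isMax hm v hv
    have hmle : ∀ p ∈ ws, p.2 ≤ m := fun p hp => hmax p.2 (List.mem_map.mpr ⟨p, hp, rfl⟩)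
    have hmpos : 0 < m := by
      by_contra h
      have : (ws.map Prod.snd).sum ≤ 0 :=
        sum_nonpos_of_le_zero _ (fun x hx => le_trans (hmax x hx) (by omega))
      omega
    have hf0 : k < pvFAbove ws 0 := lt_of_lt_of_le hksum (sum_le_pvFAbove_zero ws)
    have hfm : pvFAbove ws m ≤ k := by
      rw [pvFAbove_eq_zero ws m m hmle le_rfl]; exact hk0
    obtain ⟨hbs1, _, hbs3, hbs4⟩ := pvBS_spec ws k m.toNat 0 m (by omega) hmpos hf0 hfm
    simp only [hm, Option.getD_some]
    have hcast : ((k.toNat : Nat) : Int) = k := Int.toNat_of_nonneg hk0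
    have hmain := urLoop_eq (pvBS ws k 0 m) k.toNat ws (by omega) (by omega) (by omega) (by omega)
    rw [hcast] at hmain
    exact hmain
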